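-- pv_equiv track=rewrite | github.com/mblsha/retrobus-explorer | gateware/reference/spade-projects/sharp-pc-e500-card-spade/experiments/experiment_catalog.py | build_asm_pushu_a_sc_popu_imr_81_chain
-- ===== SOURCE A (Python) =====
-- def build_asm_pushu_a_sc_popu_imr_81_chain(count: int) -> str:
--     lines = [
--         ".ORG 0x10100",
--         "",
--         "start:",
--         "    MV A, 0x81",
--     ]
--     for _ in range(count):
--         lines.append("    PUSHU A")
--         lines.append("    SC")
--         lines.append("    POPU IMR")
--     lines.append("    RETF")
--     lines.append("")
--     return "\n".join(lines)
-- ===== SOURCE B (Python) =====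
-- def build_asm_pushu_a_sc_popu_imr_81_chain(count: int) -> str:
--     block = "    PUSHU A\n    SC\n    POPU IMR\n"
--     return (".ORG 0x10100\n\nstart:\n    MV A, 0x81\n"
--             + block * count
--             + "    RETF\n")
-- ===== Notes on version B (the rewrite author's own statement) =====
-- stated objective: simpler
-- what changed: Replaces the list-of-lines loop plus '\n'.join with a closed-form concatenation prefix + block*count + suffix of three string constants.
import Mathlib
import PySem

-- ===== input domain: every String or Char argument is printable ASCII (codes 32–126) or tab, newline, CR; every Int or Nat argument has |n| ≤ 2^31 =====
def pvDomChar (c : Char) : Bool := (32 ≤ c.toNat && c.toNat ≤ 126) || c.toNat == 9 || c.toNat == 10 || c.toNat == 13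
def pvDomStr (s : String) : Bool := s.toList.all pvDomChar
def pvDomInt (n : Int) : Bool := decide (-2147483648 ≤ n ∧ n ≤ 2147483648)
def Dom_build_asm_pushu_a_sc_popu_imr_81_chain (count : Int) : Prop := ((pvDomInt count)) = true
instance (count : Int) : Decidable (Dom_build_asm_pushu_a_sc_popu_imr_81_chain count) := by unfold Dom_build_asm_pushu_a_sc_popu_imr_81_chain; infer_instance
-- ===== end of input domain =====

-- B builds the program as a closed-form concatenation prefix ++ block*count ++ suffix instead of A's line-list loop + join (objective: simpler).


-- ===== PORT A =====
def build_asm_pushu_a_sc_popu_imr_81_chain (count : Int) : String :=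
  let lines : List String := [".ORG 0x10100", "", "start:", "    MV A, 0x81"]
  let lines := (PySem.List.pyRange 0 count 1).foldl
    (fun ls _ => ls ++ ["    PUSHU A"] ++ ["    SC"] ++ ["    POPU IMR"]) lines
  let lines := lines ++ ["    RETF"] ++ [""]
  PySem.Str.join "\n" lines

-- ===== PORT B =====
-- Python's 'block * count' (empty for count ≤ 0), ported by hand as recursion on count.toNat; exact.
def pvStrMul (s : String) : Nat → String
  | 0 => ""
  | n + 1 => s ++ pvStrMul s n

def build_asm_pushu_a_sc_popu_imr_81_chain_alt (count : Int) : String :=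
  let block := "    PUSHU A\n    SC\n    POPU IMR\n"
  ".ORG 0x10100\n\nstart:\n    MV A, 0x81\n" ++ pvStrMul block count.toNat ++ "    RETF\n"

-- ===== PRECONDITION & SPEC =====
def Spec_build_asm_pushu_a_sc_popu_imr_81_chain (count : Int) (out : String) : Prop := out = build_asm_pushu_a_sc_popu_imr_81_chain_alt count
instance (count : Int) (out : String) : Decidable (Spec_build_asm_pushu_a_sc_popu_imr_81_chain count out) := by unfold Spec_build_asm_pushu_a_sc_popu_imr_81_chain; infer_instance

-- ===== CLAIM (what is proved, stated in full; the proofs are below) =====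
def Claim_equal_build_asm_pushu_a_sc_popu_imr_81_chain : Prop := ∀ (count : Int), Dom_build_asm_pushu_a_sc_popu_imr_81_chain count → Spec_build_asm_pushu_a_sc_popu_imr_81_chain count (build_asm_pushu_a_sc_popu_imr_81_chain count)

-- ===== LEMMAS AND PROOFS =====

/-- The three lines A appends per iteration. -/
def pvBlk3 : List String := ["    PUSHU A", "    SC", "    POPU IMR"]

/-- `n` copies of the three-line block, as a line list. -/
def pvRep3 : Nat → List String
  | 0 => []
  | n + 1 => pvBlk3 ++ pvRep3 n

theorem pv_foldl_app (lst : List Int) (l : List String) :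
    lst.foldl (fun ls _ => ls ++ ["    PUSHU A"] ++ ["    SC"] ++ ["    POPU IMR"]) l
      = l ++ pvRep3 lst.length := by
  induction lst generalizing l with
  | nil => simp [pvRep3]
  | cons x xs ih =>
      simp only [List.foldl_cons, ih, List.length_cons]
      show _ = l ++ pvRep3 (xs.length + 1)
      simp [pvRep3, pvBlk3]

theorem pv_join_cons (a : List Char) (r : List (List Char)) (h : r ≠ []) :
    PySem.Chars.join ['\n'] (a :: r) = a ++ ['\n'] ++ PySem.Chars.join ['\n'] r := by
  cases r with
  | nil => exact absurd rfl h
  | cons b t => exact PySem.Chars.join_cons_cons _ _ _ _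

theorem pv_core (n : Nat) :
    PySem.Chars.join ['\n'] ((pvRep3 n ++ ["    RETF", ""]).map String.toList)
      = (pvStrMul "    PUSHU A\n    SC\n    POPU IMR\n" n).toList ++ "    RETF\n".toList := by
  induction n with
  | zero => decide
  | succ m ih =>
      have hne : ((pvRep3 m ++ ["    RETF", ""]).map String.toList) ≠ [] := by simp
      have hb : "    PUSHU A\n    SC\n    POPU IMR\n".toList
          = "    PUSHU A".toList ++ ['\n'] ++ "    SC".toList ++ ['\n']
            ++ "    POPU IMR".toList ++ ['\n'] := by decide
      simp only [pvRep3, pvBlk3, List.cons_append, List.nil_append,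
        List.map_cons]
      rw [PySem.Chars.join_cons_cons, PySem.Chars.join_cons_cons, pv_join_cons _ _ hne, ih]
      show _ = ("    PUSHU A\n    SC\n    POPU IMR\n" ++ pvStrMul _ m).toList ++ _
      rw [String.toList_append, hb]
      simp

theorem build_asm_equal (count : Int) :
    build_asm_pushu_a_sc_popu_imr_81_chain count = build_asm_pushu_a_sc_popu_imr_81_chain_alt count := by
  unfold build_asm_pushu_a_sc_popu_imr_81_chain build_asm_pushu_a_sc_popu_imr_81_chain_alt
  simp only [pv_foldl_app, PySem.List.length_pyRange_one, Int.sub_zero]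
  apply String.toList_inj.mp
  rw [PySem.Str.toList_join]
  have hsep : "\n".toList = ['\n'] := by decide
  have hp : ".ORG 0x10100\n\nstart:\n    MV A, 0x81\n".toList
      = ".ORG 0x10100".toList ++ ['\n'] ++ "".toList ++ ['\n'] ++ "start:".toList ++ ['\n']
        ++ "    MV A, 0x81".toList ++ ['\n'] := by decide
  have hne : ((pvRep3 count.toNat ++ ["    RETF", ""]).map String.toList) ≠ [] := by simp
  simp only [hsep, List.append_assoc, List.cons_append, List.nil_append, List.map_cons]
  rw [PySem.Chars.join_cons_cons, PySem.Chars.join_cons_cons, PySem.Chars.join_cons_cons,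
    pv_join_cons _ _ hne, pv_core]
  simp only [String.toList_append, hp]
  simp

-- ===== VERDICT (by name: the statement is the Claim_ definition above) =====
theorem build_asm_pushu_a_sc_popu_imr_81_chain_spec : Claim_equal_build_asm_pushu_a_sc_popu_imr_81_chain := by
  intro count _
  exact build_asm_equal count
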